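-- pv_equiv track=rewrite | github.com/valeriocos/adventOfCode | day11/day11.py | count
-- ===== SOURCE A (Python) =====
-- EMPTY = "L"
--
-- OCCUPIED = "#"
--
-- def count(matrix):
--     total = 0
--     empty = 0
--     occupied = 0
--     for i in range(0, len(matrix)):
--         for j in range(0, len(matrix[i])):
--             total += 1
--             if matrix[i][j] == EMPTY:
--                 empty += 1
--             elif matrix[i][j] == OCCUPIED:
--                 occupied += 1
--
--     return {EMPTY: empty, OCCUPIED: occupied, 'total': total}
-- ===== SOURCE B (Python) =====
-- EMPTY = "L"
--
-- OCCUPIED = "#"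
--
-- def count(matrix):
--     cells = [c for row in matrix for c in row]
--     return {EMPTY: cells.count(EMPTY), OCCUPIED: cells.count(OCCUPIED), 'total': len(cells)}
-- ===== Notes on version B (the rewrite author's own statement) =====
-- stated objective: simpler
-- what changed: Replaces the index-based nested loop with per-cell if/elif counters by flattening the matrix once and reading the three results off with list.count and len.
import Mathlib
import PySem

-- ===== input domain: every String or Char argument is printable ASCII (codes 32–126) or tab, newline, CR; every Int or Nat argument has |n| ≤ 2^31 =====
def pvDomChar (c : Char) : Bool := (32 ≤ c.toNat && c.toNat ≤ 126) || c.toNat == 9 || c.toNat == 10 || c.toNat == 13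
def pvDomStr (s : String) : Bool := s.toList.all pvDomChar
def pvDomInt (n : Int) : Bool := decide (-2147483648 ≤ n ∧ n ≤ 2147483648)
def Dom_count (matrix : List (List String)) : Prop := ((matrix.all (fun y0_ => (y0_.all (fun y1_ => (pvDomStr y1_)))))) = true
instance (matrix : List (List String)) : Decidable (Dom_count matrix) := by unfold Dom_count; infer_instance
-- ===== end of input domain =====

-- B flattens the matrix once and reads the three results off with list.count and len,
-- instead of A's index-based nested loop with per-cell if/elif counters (objective: simpler).

-- ===== PORT A =====
-- the body of A's inner loop on the state (total, empty, occupied): 'total += 1; if … elif …'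
def pvStep (acc : Int × Int × Int) (cell : String) : Int × Int × Int :=
  let total := acc.1 + 1
  if cell = "L" then (total, acc.2.1 + 1, acc.2.2)
  else if cell = "#" then (total, acc.2.1, acc.2.2 + 1)
  else (total, acc.2.1, acc.2.2)

def count (matrix : List (List String)) : List (String × Int) :=
  -- pyGetD is total here because every index comes from range(0, len(…))
  let s : Int × Int × Int :=
    (PySem.List.pyRange 0 (matrix.length : Int) 1).foldl (fun acc i =>
      (PySem.List.pyRange 0 ((PySem.List.pyGetD matrix i []).length : Int) 1).foldl
        (fun acc j => pvStep acc (PySem.List.pyGetD (PySem.List.pyGetD matrix i []) j "")) acc)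
      (0, 0, 0)
  [("L", s.2.1), ("#", s.2.2), ("total", s.1)]

-- ===== PORT B =====
def count_alt (matrix : List (List String)) : List (String × Int) :=
  let cells := matrix.flatMap (fun row => row)
  [("L", (cells.count "L" : Int)), ("#", (cells.count "#" : Int)), ("total", (cells.length : Int))]

-- ===== PRECONDITION & SPEC =====
def Spec_count (matrix : List (List String)) (out : List (String × Int)) : Prop := out = count_alt matrix
instance (matrix : List (List String)) (out : List (String × Int)) : Decidable (Spec_count matrix out) := by unfold Spec_count; infer_instance

-- ===== CLAIM (what is proved, stated in full; the proofs are below) =====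
def Claim_equal_count : Prop := ∀ (matrix : List (List String)), Dom_count matrix → Spec_count matrix (count matrix)

-- ===== LEMMAS AND PROOFS =====

theorem pvStep_foldl (cells : List String) (t e o : Int) :
    cells.foldl pvStep (t, e, o) =
      (t + cells.length, e + cells.count "L", o + cells.count "#") := by
  induction cells generalizing t e o with
  | nil => simp
  | cons c cs ih =>
    simp only [List.foldl_cons, pvStep]
    split_ifs with h1 h2 <;>
      simp [ih, *, Prod.ext_iff] <;> omega

theorem count_spec : Claim_equal_count := by
  intro matrix _
  unfold Spec_count count count_alt
  have hin : ∀ (row : List String) (a : Int × Int × Int),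
      (PySem.List.pyRange 0 (row.length : Int) 1).foldl
        (fun acc j => pvStep acc (PySem.List.pyGetD row j "")) a = row.foldl pvStep a := by
    intro row a
    exact PySem.List.foldl_pyRange_zero_pyGetD' row "" pvStep a
  simp only [hin]
  have hout : (PySem.List.pyRange 0 (matrix.length : Int) 1).foldl
      (fun acc i => (PySem.List.pyGetD matrix i []).foldl pvStep acc) (0, 0, 0) =
      matrix.foldl (fun acc row => row.foldl pvStep acc) (0, 0, 0) :=
    PySem.List.foldl_pyRange_zero_pyGetD' matrix [] (fun acc row => row.foldl pvStep acc) (0, 0, 0)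
  simp only [hout, ← List.foldl_flatten, pvStep_foldl]
  simp [List.flatMap_def]
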